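-- pv_equiv track=rewrite | github.com/OrderAndCh4oS/python-script-benchmark-tools | examples/filter_out_lowest_duplicates.py | road_runner_with_sort
-- ===== SOURCE A (Python) =====
-- from operator import itemgetter
--
-- def road_runner_with_sort(arr):
--     unique = {}
--     arr = sorted(arr, key=itemgetter('T'))
--     for dic in arr:
--         key = dic['T']
--         found = unique.get(key)
--
--         # If value found and doesn't exceed current maximum, just ignore
--         if found and dic['V'] <= found['V']:
--             continue
--
--         # otherwise just update normally
--         unique[key] = dic
--
--     return list(unique.values())
-- ===== SOURCE B (Python) =====
-- from operator import itemgetter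
--
--
-- def road_runner_with_sort(arr):
--     ordered = sorted(arr, key=itemgetter('T'))
--     keys = list(dict.fromkeys(d['T'] for d in ordered))
--     out = []
--     for key in keys:
--         best = None
--         for dic in ordered:
--             if dic['T'] == key and (best is None or dic['V'] > best['V']):
--                 best = dic
--         out.append(best)
--     return out
-- ===== Notes on version B (the rewrite author's own statement) =====
-- stated objective: alternative
-- what changed: A makes one pass over the sorted list maintaining a dict of running bests keyed by 'T' and returns its values; B instead works in stages with no dict of bests: it sorts, extracts the ordered distinct 'T' keys with dict.fromkeys, and then runs a separate full max-scan of the sorted list for each key, appending each scan's winner.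
import Mathlib
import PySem

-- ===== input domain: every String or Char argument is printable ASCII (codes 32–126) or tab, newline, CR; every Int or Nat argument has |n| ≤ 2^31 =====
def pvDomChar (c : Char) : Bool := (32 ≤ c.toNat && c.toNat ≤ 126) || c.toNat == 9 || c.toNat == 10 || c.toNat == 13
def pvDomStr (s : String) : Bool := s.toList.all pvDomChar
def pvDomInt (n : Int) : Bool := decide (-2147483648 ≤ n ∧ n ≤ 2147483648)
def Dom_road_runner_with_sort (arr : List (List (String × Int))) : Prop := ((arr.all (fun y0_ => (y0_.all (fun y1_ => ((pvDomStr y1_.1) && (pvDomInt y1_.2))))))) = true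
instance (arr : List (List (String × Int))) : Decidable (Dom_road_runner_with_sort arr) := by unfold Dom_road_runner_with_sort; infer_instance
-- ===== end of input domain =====

-- B replaces A's single dict-building pass by staged passes: sort, collect the ordered distinct keys
-- with dict.fromkeys, then for each key a separate full max-scan of the sorted list (nested scans,
-- no dict of bests). Same return value; B is O(n*k) vs A's O(n log n) — objective is 'alternative', not speed.


-- ===== PORT A =====
-- dic['T'] / dic['V'] (KeyError when absent — excluded by Pre_; the getD default is never read under Pre_)
def pvT (d : List (String × Int)) : Int := ((PySem.Dict.mk d).get? "T").getD 0
def pvV (d : List (String × Int)) : Int := ((PySem.Dict.mk d).get? "V").getD 0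

-- the body of A's for-loop: found = unique.get(key); if found and dic['V'] <= found['V']: continue; unique[key] = dic
def pvStepA (u : PySem.Dict Int (List (String × Int))) (dic : List (String × Int)) :
    PySem.Dict Int (List (String × Int)) :=
  let key := pvT dic
  match u.get? key with
  | some found => if found.isEmpty = false ∧ pvV dic ≤ pvV found then u else u.insert key dic
  | none => u.insert key dic

def road_runner_with_sort (arr : List (List (String × Int))) : List (List (String × Int)) :=
  let arr' := PySem.List.sorted arr (fun d => pvT d) false
  (arr'.foldl pvStepA PySem.Dict.empty).values

-- ===== PORT B =====
-- inner loop body of B: if dic['T'] == key and (best is None or dic['V'] > best['V']): best = dic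
-- (when best is None the disjunct short-circuits in Python; pvV (getD []) is total, so the guard is exact)
def pvScanStep (key : Int) (best : Option (List (String × Int))) (dic : List (String × Int)) :
    Option (List (String × Int)) :=
  if pvT dic = key ∧ (best.isNone = true ∨ pvV (best.getD []) < pvV dic) then some dic else best

-- B: ordered = sorted(arr, key='T'); keys = dict.fromkeys of the 'T's; per key, a full scan for its best
-- (out.append(best): best is always a dict here since key occurs in ordered; getD [] is never read)
def road_runner_with_sort_alt (arr : List (List (String × Int))) : List (List (String × Int)) :=
  let ordered := PySem.List.sorted arr (fun d => pvT d) false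
  let keys := PySem.List.dedup (ordered.map (fun d => pvT d))
  keys.map (fun key => (ordered.foldl (pvScanStep key) none).getD [])

-- ===== PRECONDITION & SPEC =====
-- Pre_ admits exactly the inputs where A returns: every element must have key 'T' (itemgetter('T')
-- raises KeyError in the sort otherwise), and an element sharing its 'T' value with another element
-- must also have key 'V' (the comparison dic['V'] <= found['V'] raises KeyError otherwise; an
-- element alone in its 'T' group never has its 'V' read).
def pvPreT (d : List (String × Int)) : Option Int := (PySem.Dict.mk d).get? "T"

def Pre_road_runner_with_sort (arr : List (List (String × Int))) : Prop :=
  (arr.all (fun d => (pvPreT d).isSome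
      && (d.any (fun p => p.1 == "V")
          || decide (arr.countP (fun e => pvPreT e = pvPreT d) ≤ 1)))) = true
instance (arr : List (List (String × Int))) : Decidable (Pre_road_runner_with_sort arr) := by unfold Pre_road_runner_with_sort; infer_instance

def pvWitness_road_runner_with_sort : (List (List (String × Int))) :=
  [[("T", 1), ("V", 5)], [("T", 1), ("V", 7)], [("T", 0), ("V", 2)]]

def Spec_road_runner_with_sort (arr : List (List (String × Int))) (out : List (List (String × Int))) : Prop := out = road_runner_with_sort_alt arr
instance (arr : List (List (String × Int))) (out : List (List (String × Int))) : Decidable (Spec_road_runner_with_sort arr out) := by unfold Spec_road_runner_with_sort; infer_instance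

-- ===== CLAIM (what is proved, stated in full; the proofs are below) =====
def Claim_equal_road_runner_with_sort : Prop := ∀ (arr : List (List (String × Int))), Dom_road_runner_with_sort arr → Pre_road_runner_with_sort arr → Spec_road_runner_with_sort arr (road_runner_with_sort arr)

-- ===== LEMMAS AND PROOFS =====

-- the common intermediate form both ports are reduced to: the sorted list cut into maximal runs of
-- equal 'T', each run reduced to its first maximal-'V' element
def pvGroups : List (List (String × Int)) → List (List (List (String × Int)))
  | [] => []
  | d :: rest =>
    (d :: rest.takeWhile (fun e => pvT e == pvT d)) ::
      pvGroups (rest.dropWhile (fun e => pvT e == pvT d))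
  termination_by l => l.length
  decreasing_by
    exact Nat.lt_succ_of_le (List.length_dropWhile_le _ _)

def pvRed (cur : List (String × Int)) (g : List (List (String × Int))) : List (String × Int) :=
  g.foldl (fun best dic => if pvV best < pvV dic then dic else best) cur

def pvBest (g : List (List (String × Int))) : List (String × Int) :=
  match g with
  | [] => []
  | b :: gs => pvRed b gs

-- ---- A-side: the dict fold over the sorted list yields the group bests ----

-- values of an insert at a fresh key append
theorem pv_values_insert_fresh (u : PySem.Dict Int (List (String × Int))) (t : Int)
    (v : List (String × Int)) (h : u.contains t = false) :
    (u.insert t v).values = u.values ++ [v] := by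
  show ((u.insert t v).items).map _ = (u.items).map _ ++ _
  rw [PySem.Dict.items_insert_of_not_contains u v h]
  simp

-- A's loop over one group of equal 'T' keeps overwriting the single slot t, matching the group reduce
theorem pv_fold_group (t : Int) (g : List (List (String × Int)))
    (u0 : PySem.Dict Int (List (String × Int))) :
    ∀ cur, cur ≠ [] → (∀ e ∈ g, pvT e = t ∧ e ≠ []) →
    g.foldl pvStepA (u0.insert t cur) = u0.insert t (pvRed cur g) := by
  induction g with
  | nil => intro cur _ _; rfl
  | cons e g ih =>
    intro cur hcur hg
    obtain ⟨het, hene⟩ := hg e (by simp)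
    have hcur' : cur.isEmpty = false := by
      cases cur <;> simp_all
    have hstep : pvStepA (u0.insert t cur) e =
        u0.insert t (if pvV cur < pvV e then e else cur) := by
      unfold pvStepA
      simp only [het, PySem.Dict.get?_insert_self]
      by_cases hle : pvV e ≤ pvV cur
      · simp [hcur', hle, not_lt.mpr hle]
      · simp [hcur', hle, lt_of_not_ge hle, PySem.Dict.insert_insert_self]
    have hrest : ∀ x ∈ g, pvT x = t ∧ x ≠ [] := fun x hx => hg x (by simp [hx])
    show List.foldl pvStepA (pvStepA (u0.insert t cur) e) g = _
    rw [hstep]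
    by_cases h : pvV cur < pvV e
    · rw [if_pos h, ih e hene hrest]; simp [pvRed, h]
    · rw [if_neg h, ih cur hcur hrest]; simp [pvRed, h]

-- after a run of key t is dropped, every remaining key is strictly larger
theorem pv_dropWhile_gt (t : Int) :
    ∀ l : List (List (String × Int)), l.Pairwise (fun a b => pvT a ≤ pvT b) →
    (∀ e ∈ l, t ≤ pvT e) →
    ∀ e ∈ l.dropWhile (fun e => pvT e == t), t < pvT e := by
  intro l
  induction l with
  | nil => simp
  | cons x l ih =>
    intro hp hle e he
    rw [List.dropWhile_cons] at he
    by_cases hx : pvT x = t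
    · rw [if_pos (by simp [hx])] at he
      exact ih hp.of_cons (fun e he' => hle e (by simp [he'])) e he
    · rw [if_neg (by simp [hx])] at he
      have hxt : t < pvT x := lt_of_le_of_ne (hle x (by simp)) (Ne.symm hx)
      rcases List.mem_cons.mp he with rfl | he'
      · exact hxt
      · exact lt_of_lt_of_le hxt (List.rel_of_pairwise_cons hp he')

-- main A invariant: folding A's step over a sorted list whose keys all exceed the dict's keys
-- appends exactly the per-group bests to the dict's values
theorem pv_fold_main (n : Nat) :
    ∀ l : List (List (String × Int)), l.length ≤ n →
    l.Pairwise (fun a b => pvT a ≤ pvT b) → (∀ d ∈ l, d ≠ []) →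
    ∀ u : PySem.Dict Int (List (String × Int)),
    (∀ k, u.contains k = true → ∀ d ∈ l, k < pvT d) →
    (l.foldl pvStepA u).values = u.values ++ (pvGroups l).map pvBest := by
  induction n with
  | zero =>
    intro l hl _ _ u _
    match l with
    | [] => simp [pvGroups]
    | d :: rest => simp at hl
  | succ n ih =>
    intro l hl hp hne u hkeys
    match l with
    | [] => simp [pvGroups]
    | d :: rest =>
      set t := pvT d with ht
      have hucont : u.contains t = false := by
        by_contra h
        have := hkeys t (by simpa using h) d (by simp)
        exact lt_irrefl t this
      have hstep1 : pvStepA u d = u.insert t d := by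
        unfold pvStepA
        simp only [← ht, (PySem.Dict.get?_eq_none_iff_contains u t).mpr hucont]
      set p : List (String × Int) → Bool := (fun e => pvT e == t) with hpdef
      have hsplit : rest.takeWhile p ++ rest.dropWhile p = rest := List.takeWhile_append_dropWhile
      have htw : ∀ e ∈ rest.takeWhile p, pvT e = t ∧ e ≠ [] := by
        intro e he
        refine ⟨by simpa [hpdef] using List.mem_takeWhile_imp he,
          hne e (List.mem_cons_of_mem _ ((List.takeWhile_sublist p).subset he))⟩
      have hfold : (d :: rest).foldl pvStepA u =
          (rest.dropWhile p).foldl pvStepA (u.insert t (pvRed d (rest.takeWhile p))) := by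
        show rest.foldl pvStepA (pvStepA u d) = _
        rw [hstep1]
        conv_lhs => rw [← hsplit]
        rw [List.foldl_append, pv_fold_group t (rest.takeWhile p) u d (hne d (by simp)) htw]
      have hdrop_lt : ∀ e ∈ rest.dropWhile p, t < pvT e :=
        pv_dropWhile_gt t rest hp.of_cons (fun e he => List.rel_of_pairwise_cons hp he)
      have hrec := ih (rest.dropWhile p)
        (le_trans (List.length_dropWhile_le p rest) (Nat.le_of_succ_le_succ hl))
        (List.Pairwise.sublist (List.dropWhile_sublist p) hp.of_cons)
        (fun e he => hne e (List.mem_cons_of_mem _ ((List.dropWhile_sublist p).subset he)))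
        (u.insert t (pvRed d (rest.takeWhile p)))
        (by
          intro k hk e he
          rw [PySem.Dict.contains_insert] at hk
          rcases Bool.or_eq_true_iff.mp hk with h1 | h2
          · have hkt : k = t := by simpa using h1
            subst hkt
            exact hdrop_lt e he
          · exact hkeys k h2 e (List.mem_cons_of_mem _ ((List.dropWhile_sublist p).subset he)))
      rw [hfold, hrec, pv_values_insert_fresh u t _ hucont]
      have hgroups : pvGroups (d :: rest) =
          (d :: rest.takeWhile p) :: pvGroups (rest.dropWhile p) := by
        rw [pvGroups, ← ht, ← hpdef]
      rw [hgroups]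
      simp [pvBest, List.append_assoc]

-- ---- B-side: the per-key scans over the sorted list yield the same group bests ----

-- a prefix containing no element of the key is skipped while best is still None
theorem pv_scan_skip_prefix (t : Int) (pre rest : List (List (String × Int)))
    (h : ∀ e ∈ pre, pvT e ≠ t) :
    (pre ++ rest).foldl (pvScanStep t) none = rest.foldl (pvScanStep t) none := by
  rw [List.foldl_append]
  have : pre.foldl (pvScanStep t) none = none := by
    induction pre with
    | nil => rfl
    | cons e pre ih =>
      have he : pvT e ≠ t := h e (by simp)
      show List.foldl (pvScanStep t) (pvScanStep t none e) pre = none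
      rw [show pvScanStep t none e = none by simp [pvScanStep, he]]
      exact ih (fun x hx => h x (by simp [hx]))
  rw [this]

-- once best is set, elements of the key update it exactly like the group reduce
theorem pv_scan_group (t : Int) (g : List (List (String × Int))) :
    ∀ b, (∀ e ∈ g, pvT e = t) →
    g.foldl (pvScanStep t) (some b) = some (pvRed b g) := by
  induction g with
  | nil => intro b _; rfl
  | cons e g ih =>
    intro b hg
    have het : pvT e = t := hg e (by simp)
    show List.foldl (pvScanStep t) (pvScanStep t (some b) e) g = _
    have hstep : pvScanStep t (some b) e = some (if pvV b < pvV e then e else b) := by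
      by_cases h : pvV b < pvV e <;> simp [pvScanStep, het, h]
    rw [hstep]
    have hrest : ∀ x ∈ g, pvT x = t := fun x hx => hg x (by simp [hx])
    by_cases h : pvV b < pvV e
    · rw [if_pos h, ih e hrest]; simp [pvRed, h]
    · rw [if_neg h, ih b hrest]; simp [pvRed, h]

-- elements of other keys after the run leave the best untouched
theorem pv_scan_tail (t : Int) (rest : List (List (String × Int))) :
    ∀ b, (∀ e ∈ rest, pvT e ≠ t) →
    rest.foldl (pvScanStep t) (some b) = some b := by
  induction rest with
  | nil => intro b _; rfl
  | cons e rest ih =>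
    intro b h
    have he : pvT e ≠ t := h e (by simp)
    show List.foldl (pvScanStep t) (pvScanStep t (some b) e) rest = _
    rw [show pvScanStep t (some b) e = some b by simp [pvScanStep, he]]
    exact ih b (fun x hx => h x (by simp [hx]))

-- Set.add folds: a fresh head element stays in front
theorem pv_foldl_add_cons (t : Int) :
    ∀ (xs : List Int) (s : List Int), t ∉ xs →
    xs.foldl PySem.Set.add (t :: s) = t :: xs.foldl PySem.Set.add s := by
  intro xs
  induction xs with
  | nil => intro s _; rfl
  | cons x xs ih =>
    intro s h
    have hx : x ≠ t := fun he => h (by simp [he])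
    have hxs : t ∉ xs := fun he => h (by simp [he])
    show List.foldl PySem.Set.add (PySem.Set.add (t :: s) x) xs = _
    have hadd : PySem.Set.add (t :: s) x = t :: PySem.Set.add s x := by
      simp only [PySem.Set.add, PySem.Set.contains]
      simp [hx]
      split <;> rfl
    rw [hadd, ih _ hxs, List.foldl_cons]

-- Set.add folds: elements already present are skipped
theorem pv_foldl_add_mem :
    ∀ (xs : List Int) (s : PySem.Set Int), (∀ x ∈ xs, PySem.Set.contains s x = true) →
    xs.foldl PySem.Set.add s = s := by
  intro xs
  induction xs with
  | nil => intro s _; rfl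
  | cons x xs ih =>
    intro s h
    have hx : x ∈ s := by simpa [PySem.Set.contains] using h x (by simp)
    show List.foldl PySem.Set.add (PySem.Set.add s x) xs = s
    rw [show PySem.Set.add s x = s by simp [PySem.Set.add, PySem.Set.contains, hx]]
    exact ih s (fun y hy => h y (by simp [hy]))

-- main B invariant: over a sorted list, mapping each distinct key to its scan best is the group bests
theorem pv_alt_main (n : Nat) :
    ∀ l : List (List (String × Int)), l.length ≤ n →
    l.Pairwise (fun a b => pvT a ≤ pvT b) →
    (PySem.List.dedup (l.map (fun d => pvT d))).map
      (fun key => (l.foldl (pvScanStep key) none).getD []) = (pvGroups l).map pvBest := by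
  induction n with
  | zero =>
    intro l hl _
    match l with
    | [] => simp [pvGroups, PySem.List.dedup, PySem.Set.ofList]
    | d :: rest => simp at hl
  | succ n ih =>
    intro l hl hp
    match l with
    | [] => simp [pvGroups, PySem.List.dedup, PySem.Set.ofList]
    | d :: rest =>
      set t := pvT d with ht
      set p : List (String × Int) → Bool := (fun e => pvT e == t) with hpdef
      have hsplit : rest.takeWhile p ++ rest.dropWhile p = rest := List.takeWhile_append_dropWhile
      have htw : ∀ e ∈ rest.takeWhile p, pvT e = t := by
        intro e he
        simpa [hpdef] using List.mem_takeWhile_imp he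
      have hdrop_lt : ∀ e ∈ rest.dropWhile p, t < pvT e :=
        pv_dropWhile_gt t rest hp.of_cons (fun e he => List.rel_of_pairwise_cons hp he)
      have hdrop_ne : ∀ e ∈ rest.dropWhile p, pvT e ≠ t := fun e he => ne_of_gt (hdrop_lt e he)
      -- the dedup of the keys is t followed by the dedup of the keys after the run
      have hkeys : PySem.List.dedup ((d :: rest).map (fun d => pvT d)) =
          t :: PySem.List.dedup ((rest.dropWhile p).map (fun d => pvT d)) := by
        have hnotmem : t ∉ (rest.dropWhile p).map (fun d => pvT d) := by
          intro hm
          rcases List.mem_map.mp hm with ⟨e, he, hte⟩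
          exact hdrop_ne e he hte
        rw [PySem.List.dedup_eq_ofList, PySem.List.dedup_eq_ofList]
        show ((d :: rest).map (fun d => pvT d)).foldl PySem.Set.add [] = _
        conv_lhs => rw [← hsplit]
        simp only [List.map_cons, List.map_append, List.foldl_cons, List.foldl_append]
        rw [show PySem.Set.add [] (pvT d) = [t] from rfl]
        rw [pv_foldl_add_mem ((rest.takeWhile p).map (fun d => pvT d)) [t] (by
          intro x hx
          rcases List.mem_map.mp hx with ⟨e, he, hte⟩
          simp [PySem.Set.contains, ← hte, htw e he])]
        rw [pv_foldl_add_cons t _ [] hnotmem]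
        rfl
      -- the scan for t over the whole list reduces the first run
      have hscan_t : (d :: rest).foldl (pvScanStep t) none = some (pvRed d (rest.takeWhile p)) := by
        conv_lhs => rw [← hsplit]
        show List.foldl (pvScanStep t) (pvScanStep t none d) (rest.takeWhile p ++ rest.dropWhile p) = _
        rw [show pvScanStep t none d = some d by simp [pvScanStep, ← ht]]
        rw [List.foldl_append, pv_scan_group t (rest.takeWhile p) d htw,
          pv_scan_tail t (rest.dropWhile p) _ hdrop_ne]
      -- the scans for the later keys ignore the first run
      have hscan_rest : ∀ key ∈ PySem.List.dedup ((rest.dropWhile p).map (fun d => pvT d)),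
          (d :: rest).foldl (pvScanStep key) none = (rest.dropWhile p).foldl (pvScanStep key) none := by
        intro key hkey
        have hkey' : key ∈ (rest.dropWhile p).map (fun d => pvT d) :=
          (PySem.List.mem_dedup _ key).mp hkey
        rcases List.mem_map.mp hkey' with ⟨e, he, hte⟩
        have hkt : t < key := hte ▸ hdrop_lt e he
        have hpre : ∀ x ∈ d :: rest.takeWhile p, pvT x ≠ key := by
          intro x hx
          rcases List.mem_cons.mp hx with rfl | hx'
          · exact fun h => absurd (h ▸ hkt) (lt_irrefl _)
          · rw [htw x hx']; exact fun h => absurd (h ▸ hkt) (lt_irrefl _)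
        have hl2 : d :: rest = (d :: rest.takeWhile p) ++ rest.dropWhile p := by
          simp [hsplit]
        rw [hl2, pv_scan_skip_prefix key (d :: rest.takeWhile p) (rest.dropWhile p) hpre]
      have hrec := ih (rest.dropWhile p)
        (le_trans (List.length_dropWhile_le p rest) (Nat.le_of_succ_le_succ hl))
        (List.Pairwise.sublist (List.dropWhile_sublist p) hp.of_cons)
      have hgroups : pvGroups (d :: rest) =
          (d :: rest.takeWhile p) :: pvGroups (rest.dropWhile p) := by
        rw [pvGroups, ← ht, ← hpdef]
      rw [hkeys, hgroups, List.map_cons, List.map_cons, hscan_t]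
      refine congrArg₂ _ rfl ?_
      rw [List.map_congr_left (fun key hk => by rw [hscan_rest key hk]), hrec]

-- ===== VERDICT (by name: the statement is the Claim_ definition above) =====
theorem road_runner_with_sort_spec : Claim_equal_road_runner_with_sort := by
  unfold Claim_equal_road_runner_with_sort
  intro arr _ hpre
  unfold Spec_road_runner_with_sort road_runner_with_sort road_runner_with_sort_alt
  unfold Pre_road_runner_with_sort at hpre
  have hne : ∀ d ∈ PySem.List.sorted arr (fun d => pvT d) false, d ≠ [] := by
    intro d hd
    have hd' : d ∈ arr := (PySem.List.mem_sorted arr _ false d).mp hd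
    have hall := List.all_eq_true.mp hpre d hd'
    rw [Bool.and_eq_true] at hall
    intro h
    subst h
    rw [show (pvPreT ([] : List (String × Int))) = none from rfl] at hall
    simp at hall
  have hA := pv_fold_main (PySem.List.sorted arr (fun d => pvT d) false).length
    (PySem.List.sorted arr (fun d => pvT d) false) le_rfl
    (PySem.List.sorted_pairwise arr (fun d => pvT d)) hne PySem.Dict.empty
    (by intro k hk; rw [PySem.Dict.contains_empty] at hk; exact absurd hk (by simp))
  have hB := pv_alt_main (PySem.List.sorted arr (fun d => pvT d) false).length
    (PySem.List.sorted arr (fun d => pvT d) false) le_rfl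
    (PySem.List.sorted_pairwise arr (fun d => pvT d))
  rw [hA, ← hB]
  rfl
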